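-- pv_equiv track=rewrite | github.com/khollbach/alpha_o | puzzle_logic.py | satisfies_constraint
-- ===== SOURCE A (Python) =====
-- WHITE = 0
--
-- BLACK = 1
--
-- def satisfies_constraint(row_or_column, expected_blocks):
--     '''([WHITE|BLACK, ...], [int, ...]) -> bool
--     Return True iff the row or column has a coloring that agrees with the 'hint'.
--     '''
--     blocks = []
--
--     current_block_size = 0
--     for square in row_or_column:
--         if square == WHITE:
--             if current_block_size > 0:
--                 blocks.append(current_block_size)
--             current_block_size = 0
--         elif square == BLACK:
--             current_block_size += 1
--     if current_block_size > 0: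
--         blocks.append(current_block_size)
--
--     return blocks == expected_blocks
-- ===== SOURCE B (Python) =====
-- WHITE = 0
--
-- BLACK = 1
--
-- def satisfies_constraint(row_or_column, expected_blocks):
--     '''([WHITE|BLACK, ...], [int, ...]) -> bool
--     Return True iff the row or column has a coloring that agrees with the 'hint'.
--     '''
--     # Drop transparent squares (anything that is neither WHITE nor BLACK),
--     # then scan the remaining list run by run, keeping the BLACK run lengths.
--     filtered = [s for s in row_or_column if s == WHITE or s == BLACK]
--     blocks = []
--     i = 0
--     n = len(filtered)
--     while i < n:
--         j = i
--         while j < n and filtered[j] == filtered[i]: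
--             j += 1
--         if filtered[i] == BLACK:
--             blocks.append(j - i)
--         i = j
--     return blocks == expected_blocks
-- ===== Notes on version B (the rewrite author's own statement) =====
-- stated objective: alternative
-- what changed: B pre-filters the row to WHITE/BLACK squares and then walks it run by run (an explicit group-by of maximal equal runs, keeping BLACK run lengths), instead of A's accumulator-with-flush single pass over the raw row.
import Mathlib
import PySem

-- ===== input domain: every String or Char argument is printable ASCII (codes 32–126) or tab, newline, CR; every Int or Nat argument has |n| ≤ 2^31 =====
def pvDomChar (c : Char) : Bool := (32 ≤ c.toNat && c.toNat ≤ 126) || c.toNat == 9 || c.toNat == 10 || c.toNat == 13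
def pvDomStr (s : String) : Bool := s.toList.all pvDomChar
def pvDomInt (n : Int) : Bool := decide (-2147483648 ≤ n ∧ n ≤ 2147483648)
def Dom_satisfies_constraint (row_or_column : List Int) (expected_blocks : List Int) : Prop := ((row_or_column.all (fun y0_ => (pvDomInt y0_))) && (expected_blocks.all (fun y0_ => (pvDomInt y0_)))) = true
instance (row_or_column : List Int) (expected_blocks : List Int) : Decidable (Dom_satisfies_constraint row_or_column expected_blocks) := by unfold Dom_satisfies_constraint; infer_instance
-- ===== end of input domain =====

-- B re-checks a nonogram hint by pre-filtering to WHITE/BLACK squares and scanning maximal runs (group-by) instead of A's accumulator-with-flush pass; return values proved equal on all inputs.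


-- ===== PORT A =====
-- one step of A's for-loop: state = (blocks so far, current_block_size)
def pvStepA (st : List Int × Int) (square : Int) : List Int × Int :=
  if square = 0 then
    (if st.2 > 0 then (st.1 ++ [st.2], 0) else (st.1, 0))
  else if square = 1 then
    (st.1, st.2 + 1)
  else
    st

def satisfies_constraint (row_or_column : List Int) (expected_blocks : List Int) : Bool :=
  let s := row_or_column.foldl pvStepA ([], 0)
  let blocks := if s.2 > 0 then s.1 ++ [s.2] else s.1
  blocks == expected_blocks

-- ===== PORT B =====
-- the outer while-loop of Source B: take the maximal run at the front (the inner
-- while-loop = span of elements equal to the first), keep its length if BLACK, recurse on the rest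
def pvRunsB (l : List Int) : List Int :=
  match l with
  | [] => []
  | x :: xs =>
      let p := xs.span (· == x)
      if x = 1 then (1 + (p.1.length : Int)) :: pvRunsB p.2 else pvRunsB p.2
termination_by l.length
decreasing_by
  all_goals
    simp only [List.span_eq_takeWhile_dropWhile]
    exact Nat.lt_succ_of_le (List.length_dropWhile_le _ _)

def satisfies_constraint_alt (row_or_column : List Int) (expected_blocks : List Int) : Bool :=
  let filtered := row_or_column.filter (fun s => s == 0 || s == 1)
  pvRunsB filtered == expected_blocks

-- ===== PRECONDITION & SPEC =====
def Spec_satisfies_constraint (row_or_column : List Int) (expected_blocks : List Int) (out : Bool) : Prop := out = satisfies_constraint_alt row_or_column expected_blocks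
instance (row_or_column : List Int) (expected_blocks : List Int) (out : Bool) : Decidable (Spec_satisfies_constraint row_or_column expected_blocks out) := by unfold Spec_satisfies_constraint; infer_instance

-- ===== CLAIM (what is proved, stated in full; the proofs are below) =====
def Claim_equal_satisfies_constraint : Prop := ∀ (row_or_column : List Int) (expected_blocks : List Int), Dom_satisfies_constraint row_or_column expected_blocks → Spec_satisfies_constraint row_or_column expected_blocks (satisfies_constraint row_or_column expected_blocks)

-- ===== LEMMAS AND PROOFS =====
-- right-recursive characterisation of A's loop: blocks still to be emitted,
-- given remaining input and current block size c
def pvG : List Int → Int → List Int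
  | [], c => if c > 0 then [c] else []
  | x :: xs, c =>
      if x = 0 then (if c > 0 then c :: pvG xs 0 else pvG xs 0)
      else if x = 1 then pvG xs (c + 1)
      else pvG xs c

theorem pvFoldA_eq : ∀ (l : List Int) (blocks : List Int) (c : Int),
    (let s := l.foldl pvStepA (blocks, c);
     if s.2 > 0 then s.1 ++ [s.2] else s.1) = blocks ++ pvG l c := by
  intro l
  induction l with
  | nil =>
      intro blocks c
      simp only [List.foldl_nil, pvG]
      split_ifs <;> simp
  | cons x xs ih =>
      intro blocks c
      simp only [List.foldl_cons, pvG, pvStepA]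
      by_cases h0 : x = 0
      · by_cases hc : c > 0 <;> simp [h0, hc, ih]
      · by_cases h1 : x = 1 <;> simp [h0, h1, ih]

theorem pvG_filter : ∀ (l : List Int) (c : Int),
    pvG l c = pvG (l.filter (fun s => s == 0 || s == 1)) c := by
  intro l
  induction l with
  | nil => intro c; rfl
  | cons x xs ih =>
      intro c
      by_cases h0 : x = 0
      · simp [pvG, List.filter, h0, ih]
      · by_cases h1 : x = 1
        · simp [pvG, List.filter, h1, ih]
        · have hb : (x == 0 || x == 1) = false := by simp [h0, h1]
          simp [pvG, List.filter, hb, h0, h1, ih]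

theorem pvG_ones : ∀ (xs : List Int), (∀ x ∈ xs, x = 1) →
    ∀ (rest : List Int) (c : Int), pvG (xs ++ rest) c = pvG rest (c + xs.length) := by
  intro xs
  induction xs with
  | nil => intro _ rest c; simp
  | cons y ys ih =>
      intro h rest c
      have hy : y = 1 := h y (by simp)
      have := ih (fun x hx => h x (by simp [hx])) rest (c + 1)
      simp only [List.cons_append, pvG, hy]
      norm_num
      rw [this]
      congr 1
      ring

theorem pvG_zeros : ∀ (xs : List Int), (∀ x ∈ xs, x = 0) →
    ∀ (rest : List Int), pvG (xs ++ rest) 0 = pvG rest 0 := by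
  intro xs
  induction xs with
  | nil => intro _ rest; rfl
  | cons y ys ih =>
      intro h rest
      have hy : y = 0 := h y (by simp)
      have := ih (fun x hx => h x (by simp [hx])) rest
      simp [pvG, hy, this]

theorem pvG_flush : ∀ (rest : List Int) (c : Int), 0 < c →
    (rest = [] ∨ rest.head? = some 0) → pvG rest c = c :: pvG rest 0 := by
  intro rest c hc h
  rcases h with h | h
  · subst h; simp [pvG, hc]
  · cases rest with
    | nil => simp at h
    | cons y ys =>
        simp only [List.head?_cons, Option.some.injEq] at h
        subst h
        simp [pvG, hc]

theorem pvRunsB_eq_pvG : ∀ (n : Nat) (l : List Int), l.length ≤ n →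
    (∀ x ∈ l, x = 0 ∨ x = 1) → pvRunsB l = pvG l 0 := by
  intro n
  induction n with
  | zero =>
      intro l hl _
      have : l = [] := List.eq_nil_of_length_eq_zero (Nat.le_zero.mp hl)
      subst this
      simp [pvRunsB, pvG]
  | succ n ih =>
      intro l hl hmem
      cases l with
      | nil => simp [pvRunsB, pvG]
      | cons x xs =>
          have hsplit : xs.takeWhile (· == x) ++ xs.dropWhile (· == x) = xs :=
            List.takeWhile_append_dropWhile
          have hrestlen : (xs.dropWhile (· == x)).length ≤ n := by
            have := (List.dropWhile_sublist (l := xs) (· == x)).length_le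
            simp only [List.length_cons, Nat.succ_le_succ_iff] at hl
            omega
          have hrestmem : ∀ y ∈ xs.dropWhile (· == x), y = 0 ∨ y = 1 := by
            intro y hy
            exact hmem y (by
              have : y ∈ xs := (List.dropWhile_sublist (· == x)).mem hy
              simp [this])
          have hrunmem : ∀ y ∈ xs.takeWhile (· == x), y = x := by
            intro y hy
            simpa using List.mem_takeWhile_imp hy
          have hih := ih _ hrestlen hrestmem
          rcases hmem x (by simp) with hx | hx
          · -- WHITE run: dropped by both
            subst hx
            rw [pvRunsB]
            simp only [List.span_eq_takeWhile_dropWhile]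
            rw [if_neg (by norm_num), hih]
            have h1 : pvG (0 :: xs) 0 = pvG xs 0 := by simp [pvG]
            have h2 : pvG xs 0 = pvG (xs.dropWhile (· == (0:Int))) 0 := by
              conv_lhs => rw [← hsplit]
              exact pvG_zeros _ hrunmem _
            rw [h1, h2]
          · -- BLACK run
            subst hx
            rw [pvRunsB]
            simp only [List.span_eq_takeWhile_dropWhile]
            rw [if_pos trivial, hih]
            have h1 : pvG (1 :: xs) 0 = pvG xs 1 := by simp [pvG]
            have h2 : pvG xs 1 =
                pvG (xs.dropWhile (· == (1:Int))) (1 + (xs.takeWhile (· == (1:Int))).length) := by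
              conv_lhs => rw [← hsplit]
              exact pvG_ones _ hrunmem _ 1
            have hhead : xs.dropWhile (· == (1:Int)) = [] ∨
                (xs.dropWhile (· == (1:Int))).head? = some 0 := by
              cases hdw : xs.dropWhile (· == (1:Int)) with
              | nil => exact Or.inl rfl
              | cons z zs =>
                  right
                  have hz1 : ¬ (z == (1:Int)) = true := by
                    have := List.head?_dropWhile_not (· == (1:Int)) xs
                    rw [hdw] at this
                    simpa using this
                  have hz : z = 0 ∨ z = 1 := hrestmem z (by rw [hdw]; simp)
                  simp at hz1
                  rcases hz with hz | hz
                  · simp [hz]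
                  · exact absurd hz hz1
            rw [h1, h2, pvG_flush (xs.dropWhile (· == (1:Int))) (1 + (xs.takeWhile (· == (1:Int))).length) (by positivity) hhead]

-- ===== VERDICT (by name: the statement is the Claim_ definition above) =====
theorem satisfies_constraint_spec : Claim_equal_satisfies_constraint := by
  intro l e _
  unfold Spec_satisfies_constraint satisfies_constraint satisfies_constraint_alt
  have hA := pvFoldA_eq l [] 0
  simp only [List.nil_append] at hA
  have hmem : ∀ x ∈ l.filter (fun s => s == 0 || s == 1), x = 0 ∨ x = 1 := by
    intro x hx
    have := List.of_mem_filter hx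
    simpa using this
  have hB : pvG l 0 = pvRunsB (l.filter (fun s => s == 0 || s == 1)) := by
    rw [pvG_filter]
    exact (pvRunsB_eq_pvG (l.filter (fun s => s == 0 || s == 1)).length _ le_rfl hmem).symm
  exact congrArg (fun b => b == e) (hA.trans hB)
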